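-- pv_equiv track=rewrite | github.com/Taoge123/OptimizedLeetcode | LeetcodeNew/python2/biantai.py | solution
-- ===== SOURCE A (Python) =====
-- def solution(H):
--     MOD = 1000000007
--     n = len(H)
--     dp = [[0, 0] for i in range(n)]
--
--     for i in range(n):
--         dp[i] = [i, H[i]]
--     temp = [[0 for i in range(n + 1)] for j in range(n + 1)]
--     dp = sorted(dp, key=lambda x: x[1])
--     for i in range(n-1, -1, -1):
--         temp[i][n] = 1
--
--     for i in range(n - 1, -1, -1):
--         for j in range(n-1, i, -1):
--             res = 0
--             for k in range(j+1, n+1):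
--                 if (k == n or (dp[k][0]-dp[i][0]) * (dp[j][0] - dp[i][0]) < 0):
--                     res += temp[i][k]
--                     res %= MOD
--             temp[i][j] = res
--
--     res = 0
--     for i in range(n):
--         res += calc(i, temp, n, MOD)
--         res %= MOD
--     return res
--
-- def calc(i, ways, n, MOD):
--     res = 0
--     for j in range(i+1, n+1):
--         res += ways[i][j]
--         res %= MOD
--
--     return res
-- ===== SOURCE B (Python) =====
-- def solution(H):
--     # O(n^2): for each pivot i keep two running suffix sums (values on each side
--     # of dp[i]'s original position) instead of rescanning k for every j.
--     MOD = 1000000007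
--     n = len(H)
--     dp = sorted(([i, H[i]] for i in range(n)), key=lambda x: x[1])
--     ans = 0
--     for i in range(n):
--         pi = dp[i][0]
--         ans = (ans + 1) % MOD      # the chain that stops at i (temp[i][n])
--         s_neg = 0                  # sum of values v_k with dp[k][0] < pi, k already seen
--         s_pos = 0                  # sum of values v_k with dp[k][0] > pi
--         for j in range(n - 1, i, -1):
--             if dp[j][0] > pi:
--                 v = (1 + s_neg) % MOD
--                 s_pos = (s_pos + v) % MOD
--             else:
--                 v = (1 + s_pos) % MOD
--                 s_neg = (s_neg + v) % MOD
--             ans = (ans + v) % MOD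
--     return ans
-- ===== Notes on version B (the rewrite author's own statement) =====
-- stated objective: faster
-- what changed: Per pivot i, B replaces A's O(n^2) temp table with the inner k-rescan by a single descending j-pass that maintains two running suffix sums (values whose sorted entry lies left/right of dp[i]'s original position) plus the running answer, eliminating the table and the inner loop.
import Mathlib
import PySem

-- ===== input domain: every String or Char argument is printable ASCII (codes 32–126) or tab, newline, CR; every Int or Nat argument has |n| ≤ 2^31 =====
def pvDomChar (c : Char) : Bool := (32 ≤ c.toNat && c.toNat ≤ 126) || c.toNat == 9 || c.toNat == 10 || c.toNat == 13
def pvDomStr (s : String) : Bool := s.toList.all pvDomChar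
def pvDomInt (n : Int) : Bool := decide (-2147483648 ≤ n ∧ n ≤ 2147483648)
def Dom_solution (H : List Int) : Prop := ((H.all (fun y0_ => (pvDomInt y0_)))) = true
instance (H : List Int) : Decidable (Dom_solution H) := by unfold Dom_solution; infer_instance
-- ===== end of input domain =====

-- B replaces A's O(n^3) table fill (inner k-rescan per cell) by two running suffix sums per
-- pivot, an O(n^2) pass; same return value, proved equal below.

-- ===== PORT A =====
def pvMOD : Int := 1000000007

-- shared preprocessing of both Pythons: dp = sorted([[i, H[i]] for i in range(n)], key=lambda x: x[1])
-- (indices i are always in range, so H.getD i 0 is exactly Python's H[i])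
def pvDp (H : List Int) : List (Int × Int) :=
  PySem.List.sorted ((List.range H.length).map fun (i : Nat) => ((i : Int), H.getD i 0)) (fun x => x.2)

-- dp[k][0], read at in-range k only
def pvPos (H : List Int) (k : Nat) : Int := ((pvDp H).getD k ((0 : Int), (0 : Int))).1

-- A's inner k-loop: res over range(j+1, n+1), reading row ρ = temp[i]
def pvInner (P : Nat → Int) (n : Nat) (ρ : Nat → Int) (i j : Nat) : Int :=
  (List.range' (j+1) (n - j)).foldl
    (fun res k =>
      if k = n ∨ (P k - P i) * (P j - P i) < 0 then (res + ρ k) % pvMOD else res) 0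

-- A's j-loop for a fixed i: for j in range(n-1, i, -1): temp[i][j] = res
-- (the (n+1)×(n+1) array temp is modelled as a function of the two indices)
def pvFillRow (P : Nat → Int) (n i : Nat) (t : Nat → Nat → Int) : Nat → Nat → Int :=
  ((List.range' (i+1) (n-1-i)).reverse).foldl
    (fun t j => fun a b => if a = i ∧ b = j then pvInner P n (t i) i j else t a b) t

-- A's helper calc(i, ways, n, MOD)
def pvCalc (i : Nat) (ways : Nat → Nat → Int) (n : Nat) (MOD : Int) : Int :=
  (List.range' (i+1) (n - i)).foldl (fun res j => (res + ways i j) % MOD) 0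

def solution (H : List Int) : Int :=
  let n := H.length
  let P := pvPos H
  -- for i in range(n-1,-1,-1): temp[i][n] = 1
  let temp1 : Nat → Nat → Int :=
    (List.range n).reverse.foldl
      (fun t i => fun a b => if a = i ∧ b = n then 1 else t a b) (fun _ _ => 0)
  -- for i in range(n-1,-1,-1): for j in range(n-1,i,-1): …
  let temp2 := (List.range n).reverse.foldl (fun t i => pvFillRow P n i t) temp1
  (List.range n).foldl (fun res i => (res + pvCalc i temp2 n pvMOD) % pvMOD) 0

-- ===== PORT B =====
-- one step of B's inner j-loop; state = (s_neg, s_pos, ans)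
def pvStepB (P : Nat → Int) (i : Nat) (st : Int × Int × Int) (j : Nat) : Int × Int × Int :=
  if P i < P j then
    let v := (1 + st.1) % pvMOD
    (st.1, (st.2.1 + v) % pvMOD, (st.2.2 + v) % pvMOD)
  else
    let v := (1 + st.2.1) % pvMOD
    ((st.1 + v) % pvMOD, st.2.1, (st.2.2 + v) % pvMOD)

def solution_alt (H : List Int) : Int :=
  let n := H.length
  let P := pvPos H
  (List.range n).foldl (fun ans i =>
    (((List.range' (i+1) (n-1-i)).reverse).foldl (pvStepB P i)
      (0, 0, (ans + 1) % pvMOD)).2.2) 0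

-- ===== PRECONDITION & SPEC =====
def Spec_solution (H : List Int) (out : Int) : Prop := out = solution_alt H
instance (H : List Int) (out : Int) : Decidable (Spec_solution H out) := by unfold Spec_solution; infer_instance

-- ===== CLAIM (what is proved, stated in full; the proofs are below) =====
def Claim_equal_solution : Prop := ∀ (H : List Int), Dom_solution H → Spec_solution H (solution H)

-- ===== LEMMAS AND PROOFS =====

-- row fold of A's j-loop, acting on row i only
def pvRowFold (P : Nat → Int) (n i : Nat) (L : List Nat) (ρ : Nat → Int) : Nat → Int :=
  L.foldl (fun ρ j => fun b => if b = j then pvInner P n ρ i j else ρ b) ρ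

-- A's row i after processing the last m columns (j from n-1 down to n-m)
def pvR (P : Nat → Int) (n i m : Nat) : Nat → Int :=
  pvRowFold P n i ((List.range' (n-m) m).reverse) (fun b => if b = n then (1:Int) else 0)

lemma pv_add_emod_left (x S y M : Int) (h : x % M = S % M) :
    (x + y) % M = (S + y) % M := by
  rw [Int.add_emod, h, ← Int.add_emod]

-- conditional mod-accumulating fold = mod of the selected sum
lemma pv_fold_mod_cond (c : Nat → Prop) [DecidablePred c] (g : Nat → Int) (M : Int) :
    ∀ (L : List Nat) (r : Int),
      (L.foldl (fun res k => if c k then (res + g k) % M else res) r) % M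
        = (r + (L.map fun k => if c k then g k else 0).sum) % M := by
  intro L
  induction L with
  | nil => intro r; simp
  | cons k L ih =>
    intro r
    simp only [List.foldl_cons, List.map_cons, List.sum_cons]
    by_cases hc : c k
    · simp only [if_pos hc, ih]
      rw [pv_add_emod_left ((r + g k) % M) (r + g k) _ _ (by rw [Int.emod_emod_of_dvd _ dvd_rfl])]
      ring_nf
    · simp only [if_neg hc, ih, zero_add]

-- unconditional variant (A's calc)
lemma pv_fold_mod (g : Nat → Int) (M : Int) :
    ∀ (L : List Nat) (r : Int),
      (L.foldl (fun res k => (res + g k) % M) r) % M = (r + (L.map g).sum) % M := by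
  intro L
  induction L with
  | nil => intro r; simp
  | cons k L ih =>
    intro r
    simp only [List.foldl_cons, List.map_cons, List.sum_cons, ih]
    rw [pv_add_emod_left ((r + g k) % M) (r + g k) _ _ (by rw [Int.emod_emod_of_dvd _ dvd_rfl])]
    ring_nf

-- the first loop: temp[i][n] = 1 for all i in the list
lemma pv_temp1 (n : Nat) :
    ∀ (L : List Nat) (t : Nat → Nat → Int),
      L.foldl (fun t i => fun a b => if a = i ∧ b = n then (1:Int) else t a b) t
        = fun a b => if a ∈ L ∧ b = n then (1:Int) else t a b := by
  intro L
  induction L with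
  | nil => intro t; funext a b; simp
  | cons i L ih =>
    intro t
    simp only [List.foldl_cons, ih]
    funext a b
    by_cases hb : b = n
    · subst hb
      by_cases hm : a ∈ L <;> by_cases ha : a = i <;> simp [hm, ha]
    · simp [hb]

-- the j-loop writes and reads only row i
lemma pv_fill_row_eval (P : Nat → Int) (n i : Nat) :
    ∀ (L : List Nat) (t : Nat → Nat → Int),
      L.foldl (fun t j => fun a b => if a = i ∧ b = j then pvInner P n (t i) i j else t a b) t
        = fun a b => if a = i then pvRowFold P n i L (t i) b else t a b := by
  intro L
  induction L with
  | nil =>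
    intro t; funext a b
    simp only [List.foldl_nil, pvRowFold]
    split_ifs with h
    · subst h; rfl
    · rfl
  | cons j L ih =>
    intro t
    simp only [List.foldl_cons, ih]
    funext a b
    by_cases ha : a = i
    · subst ha
      simp only [pvRowFold, List.foldl_cons, true_and, if_true]
    · simp [ha]

-- rows not in the iteration list are untouched
lemma pv_rows_other (P : Nat → Int) (n : Nat) :
    ∀ (I : List Nat) (t : Nat → Nat → Int) (i0 : Nat), i0 ∉ I →
      ∀ b, (I.foldl (fun t i => pvFillRow P n i t) t) i0 b = t i0 b := by
  intro I
  induction I with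
  | nil => intro t i0 _ b; rfl
  | cons a I ih =>
    intro t i0 h b
    simp only [List.mem_cons, not_or] at h
    simp only [List.foldl_cons]
    rw [ih _ _ h.2]
    simp only [pvFillRow, pv_fill_row_eval]
    simp [h.1]

-- the outer fill loop, evaluated at a row of the (nodup) iteration list
lemma pv_rows (P : Nat → Int) (n : Nat) :
    ∀ (I : List Nat) (t : Nat → Nat → Int), I.Nodup → ∀ i0 ∈ I, ∀ b,
      (I.foldl (fun t i => pvFillRow P n i t) t) i0 b
        = pvRowFold P n i0 ((List.range' (i0+1) (n-1-i0)).reverse) (t i0) b := by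
  intro I
  induction I with
  | nil => intro t _ i0 h; simp at h
  | cons a I ih =>
    intro t hnd i0 hmem b
    simp only [List.foldl_cons]
    rcases List.mem_cons.mp hmem with h | h
    · subst h
      rw [pv_rows_other P n I _ _ (List.nodup_cons.mp hnd).1]
      simp only [pvFillRow, pv_fill_row_eval]
      simp
    · have hne : i0 ≠ a := by
        rintro rfl; exact (List.nodup_cons.mp hnd).1 h
      rw [ih _ (List.nodup_cons.mp hnd).2 _ h]
      congr 1
      simp only [pvFillRow, pv_fill_row_eval]
      funext b'
      simp [hne]

-- the sorted dp keeps the original indices distinct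
lemma pv_inj (H : List Int) :
    ∀ j k, j < H.length → k < H.length → pvPos H j = pvPos H k → j = k := by
  intro j k hj hk h
  have hperm := PySem.List.sorted_perm
    ((List.range H.length).map fun (i : Nat) => ((i : Int), H.getD i 0)) (fun x => x.2) false
  have hlen : (pvDp H).length = H.length := by
    have := hperm.length_eq
    simpa [pvDp] using this
  have hnd : ((pvDp H).map Prod.fst).Nodup := by
    have h1 : ((pvDp H).map Prod.fst).Perm
        ((((List.range H.length).map fun (i : Nat) => ((i : Int), H.getD i 0))).map Prod.fst) := by
      exact List.Perm.map Prod.fst hperm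
    have h2 : ((((List.range H.length).map fun (i : Nat) => ((i : Int), H.getD i 0))).map Prod.fst)
        = (List.range H.length).map (fun (i : Nat) => (i : Int)) := by
      simp [List.map_map, Function.comp]
    have h3 : ((List.range H.length).map (fun (i : Nat) => (i : Int))).Nodup :=
      List.nodup_range.map (fun a b hab => by exact_mod_cast hab)
    rw [h2] at h1
    exact h1.nodup_iff.mpr h3
  have hj' : j < ((pvDp H).map Prod.fst).length := by simp [hlen]; omega
  have hk' : k < ((pvDp H).map Prod.fst).length := by simp [hlen]; omega
  have e1 : pvPos H j = ((pvDp H).map Prod.fst)[j] := by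
    simp [pvPos, List.getD_eq_getElem?_getD, List.getElem?_eq_getElem (by omega : j < (pvDp H).length)]
  have e2 : pvPos H k = ((pvDp H).map Prod.fst)[k] := by
    simp [pvPos, List.getD_eq_getElem?_getD, List.getElem?_eq_getElem (by omega : k < (pvDp H).length)]
  exact (hnd.getElem_inj_iff).mp (by rw [← e1, ← e2, h])

lemma pv_prod_neg_iff (a b : Int) (hb : 0 < b) : a * b < 0 ↔ a < 0 := by
  constructor
  · intro h; by_contra hc; nlinarith [not_lt.mp hc]
  · intro h; exact mul_neg_of_neg_of_pos h hb

lemma pv_prod_neg_iff' (a b : Int) (hb : b < 0) : a * b < 0 ↔ 0 < a := by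
  constructor
  · intro h; by_contra hc; nlinarith [not_lt.mp hc]
  · intro h; exact mul_neg_of_pos_of_neg h hb

lemma pv_emod_add (a b a' b' M : Int) (ha : a % M = a' % M) (hb : b % M = b' % M) :
    (a + b) % M = (a' + b') % M := by
  rw [Int.add_emod, ha, hb, ← Int.add_emod]

lemma pv_self (x M : Int) : x % M % M = x % M := Int.emod_emod_of_dvd _ dvd_rfl

lemma pv_sh1 (a b M : Int) : (a % M + (1 + b % M) % M) % M = ((b + 1) % M + a) % M := by
  rw [pv_emod_add _ _ a (1 + b) M (pv_self a M)
        ((pv_self _ M).trans (pv_emod_add 1 (b % M) 1 b M rfl (pv_self b M))),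
      pv_emod_add _ _ (b + 1) a M (pv_self (b+1) M) rfl]
  congr 1
  ring

lemma pv_sh3 (a0 g b M : Int) :
    ((a0 + g) % M + (1 + b % M) % M) % M = (a0 + ((b + 1) % M + g)) % M := by
  rw [pv_emod_add _ _ (a0 + g) (1 + b) M (pv_self _ M)
        ((pv_self _ M).trans (pv_emod_add 1 (b % M) 1 b M rfl (pv_self b M))),
      pv_emod_add a0 ((b + 1) % M + g) a0 ((b + 1) + g) M rfl
        (pv_emod_add _ _ (b + 1) g M (pv_self (b+1) M) rfl)]
  congr 1
  ring

-- CENTRAL INVARIANT: A's row values vs B's two suffix sums and running answer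
lemma pv_inv (P : Nat → Int) (n i : Nat) (hi : i < n)
    (hne : ∀ j, i < j → j < n → P j ≠ P i) :
    ∀ m, m ≤ n-1-i →
      (∀ b, b < n - m ∨ n ≤ b → pvR P n i m b = (if b = n then (1:Int) else 0))
      ∧ ∀ a0 : Int, a0 % pvMOD = a0 →
        ((List.range' (n-m) m).reverse).foldl (pvStepB P i) (0, 0, a0)
          = ( ((List.range' (n-m) m).map (fun k => if P k < P i then pvR P n i m k else 0)).sum % pvMOD,
              ((List.range' (n-m) m).map (fun k => if P i < P k then pvR P n i m k else 0)).sum % pvMOD,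
              (a0 + ((List.range' (n-m) m).map (pvR P n i m)).sum) % pvMOD ) := by
  intro m
  induction m with
  | zero =>
    intro _
    refine ⟨fun b _ => by simp [pvR, pvRowFold], fun a0 ha0 => ?_⟩
    simp [ha0]
  | succ m ih =>
    intro hm
    obtain ⟨ihA, ihB⟩ := ih (by omega)
    set j := n - (m+1) with hjdef
    have hij : i < j := by omega
    have hjn : j < n := by omega
    have hnm : n - m = j + 1 := by omega
    rw [hnm] at ihA ihB
    have hlist : List.range' j (m+1) = j :: List.range' (j+1) m := List.range'_succ
    have hrev : (List.range' j (m+1)).reverse = (List.range' (j+1) m).reverse ++ [j] := by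
      rw [hlist, List.reverse_cons]
    have hRm : pvR P n i m = pvRowFold P n i ((List.range' (j+1) m).reverse)
        (fun b => if b = n then (1:Int) else 0) := by
      rw [pvR, hnm]
    have hRstep : pvR P n i (m+1)
        = fun b => if b = j then pvInner P n (pvR P n i m) i j else pvR P n i m b := by
      rw [hRm]
      simp only [pvR, hjdef.symm, hrev, pvRowFold, List.foldl_append, List.foldl_cons,
        List.foldl_nil]
    have hmem : ∀ k ∈ List.range' (j+1) m, j + 1 ≤ k ∧ k < n := by
      intro k hk
      have := List.mem_range'_1.mp hk
      omega
    have hinlist : List.range' (j+1) (n-j) = List.range' (j+1) m ++ [n] := by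
      rw [(by omega : n - j = m + 1), List.range'_concat, (by omega : j+1+1*m = n)]
    have hresfold : pvInner P n (pvR P n i m) i j
        = ((List.range' (j+1) m).foldl
            (fun res k => if k = n ∨ (P k - P i) * (P j - P i) < 0
              then (res + pvR P n i m k) % pvMOD else res) 0 + 1) % pvMOD := by
      simp only [pvInner, hinlist, List.foldl_append, List.foldl_cons, List.foldl_nil]
      have h1 : pvR P n i m n = 1 := by
        have := ihA n (Or.inr le_rfl); simpa using this
      simp [h1]
    have hRold : ∀ k ∈ List.range' (j+1) m, pvR P n i (m+1) k = pvR P n i m k := by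
      intro k hk
      have hk' := hmem k hk
      rw [hRstep]; simp only [if_neg (by omega : k ≠ j)]
    have hRj : pvR P n i (m+1) j = pvInner P n (pvR P n i m) i j := by
      rw [hRstep]; simp
    have hPne := hne j hij hjn
    have hApart : ∀ b, b < j ∨ n ≤ b → pvR P n i (m+1) b = (if b = n then (1:Int) else 0) := by
      intro b hb
      have hbne : b ≠ j := by omega
      rw [hRstep]
      simp only [if_neg hbne]
      exact ihA b (by omega)
    set Sn := ((List.range' (j+1) m).map (fun k => if P k < P i then pvR P n i m k else 0)).sum with hSn
    set Sp := ((List.range' (j+1) m).map (fun k => if P i < P k then pvR P n i m k else 0)).sum with hSp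
    set Sg := ((List.range' (j+1) m).map (pvR P n i m)).sum with hSg
    have htails : ∀ a0 : Int, a0 % pvMOD = a0 →
        ((List.range' (j+1) m).map (fun k => if P k < P i then pvR P n i (m+1) k else 0)).sum = Sn
        ∧ ((List.range' (j+1) m).map (fun k => if P i < P k then pvR P n i (m+1) k else 0)).sum = Sp
        ∧ ((List.range' (j+1) m).map (pvR P n i (m+1))).sum = Sg := by
      intro _ _
      refine ⟨?_, ?_, ?_⟩ <;>
        [skip; skip; exact congrArg List.sum (List.map_congr_left hRold)] <;>
        exact congrArg List.sum (List.map_congr_left (fun k hk => by rw [hRold k hk]))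
    rcases lt_or_gt_of_ne hPne with hPj | hPj
    · -- P j < P i : A selects the k with P i < P k; B takes its else-branch
      have hres : pvInner P n (pvR P n i m) i j = (Sp + 1) % pvMOD := by
        rw [hresfold]
        apply pv_add_emod_left
        rw [pv_fold_mod_cond (fun k => k = n ∨ (P k - P i) * (P j - P i) < 0)
          (pvR P n i m) pvMOD (List.range' (j+1) m) 0, zero_add, hSp]
        congr 1
        refine congrArg List.sum (List.map_congr_left ?_)
        intro k hk
        have hk' := hmem k hk
        have hkn : k ≠ n := by omega
        have hprod : (P k - P i) * (P j - P i) < 0 ↔ P i < P k := by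
          rw [pv_prod_neg_iff' _ _ (by omega)]
          omega
        simp [hkn, hprod]
      refine ⟨hApart, ?_⟩
      intro a0 ha0
      obtain ⟨ht1, ht2, ht3⟩ := htails a0 ha0
      rw [hrev, List.foldl_append, ihB a0 ha0, List.foldl_cons, List.foldl_nil, hlist]
      simp only [List.map_cons, List.sum_cons, ht1, ht2, ht3, hRj, hres,
        if_neg (not_lt.mpr (le_of_lt hPj)), if_pos hPj, pvStepB]
      refine Prod.ext ?_ (Prod.ext ?_ ?_)
      · exact pv_sh1 Sn Sp pvMOD
      · show Sp % pvMOD = (0 + Sp) % pvMOD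
        rw [zero_add]
      · exact pv_sh3 a0 Sg Sp pvMOD
    · -- P i < P j : A selects the k with P k < P i; B takes its then-branch
      have hres : pvInner P n (pvR P n i m) i j = (Sn + 1) % pvMOD := by
        rw [hresfold]
        apply pv_add_emod_left
        rw [pv_fold_mod_cond (fun k => k = n ∨ (P k - P i) * (P j - P i) < 0)
          (pvR P n i m) pvMOD (List.range' (j+1) m) 0, zero_add, hSn]
        congr 1
        refine congrArg List.sum (List.map_congr_left ?_)
        intro k hk
        have hk' := hmem k hk
        have hkn : k ≠ n := by omega
        have hprod : (P k - P i) * (P j - P i) < 0 ↔ P k < P i := by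
          rw [pv_prod_neg_iff _ _ (by omega)]
          omega
        simp [hkn, hprod]
      refine ⟨hApart, ?_⟩
      intro a0 ha0
      obtain ⟨ht1, ht2, ht3⟩ := htails a0 ha0
      rw [hrev, List.foldl_append, ihB a0 ha0, List.foldl_cons, List.foldl_nil, hlist]
      simp only [List.map_cons, List.sum_cons, ht1, ht2, ht3, hRj, hres,
        if_pos hPj, if_neg (not_lt.mpr (le_of_lt hPj)), pvStepB]
      refine Prod.ext ?_ (Prod.ext ?_ ?_)
      · show Sn % pvMOD = (0 + Sn) % pvMOD
        rw [zero_add]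
      · exact pv_sh1 Sp Sn pvMOD
      · exact pv_sh3 a0 Sg Sn pvMOD

-- ===== VERDICT (by name: the statement is the Claim_ definition above) =====
theorem solution_spec : Claim_equal_solution := by
  unfold Claim_equal_solution Spec_solution
  intro H _
  simp only [solution, solution_alt]
  apply PySem.List.foldl_congr_mem
  intro r i hi
  have hin : i < H.length := List.mem_range.mp hi
  have hne : ∀ j, i < j → j < H.length → pvPos H j ≠ pvPos H i := by
    intro j h1 h2 heq
    have := pv_inj H j i h2 hin heq
    omega
  obtain ⟨hA1, hA2⟩ := pv_inv (pvPos H) H.length i hin hne (H.length - 1 - i) le_rfl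
  have hidx : H.length - (H.length - 1 - i) = i + 1 := by omega
  rw [hidx] at hA1 hA2
  -- the first loop: temp1 a b = 1 iff a < n and b = n
  have htemp1 : ((List.range H.length).reverse.foldl
      (fun t i => fun a b => if a = i ∧ b = H.length then (1:Int) else t a b) (fun _ _ => 0))
      = fun a b => if a < H.length ∧ b = H.length then (1:Int) else 0 := by
    rw [pv_temp1]
    funext a b
    simp [List.mem_reverse, List.mem_range]
  -- row i of the filled table
  have htemp2 : ∀ b, ((List.range H.length).reverse.foldl
      (fun t i => pvFillRow (pvPos H) H.length i t)
      ((List.range H.length).reverse.foldl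
        (fun t i => fun a b => if a = i ∧ b = H.length then (1:Int) else t a b) (fun _ _ => 0))) i b
      = pvR (pvPos H) H.length i (H.length - 1 - i) b := by
    intro b
    rw [pv_rows (pvPos H) H.length ((List.range H.length).reverse) _
        (List.nodup_reverse.mpr List.nodup_range) i (by simpa [List.mem_reverse] using hi) b]
    rw [pvR, hidx]
    congr 1
    rw [htemp1]
    funext b'
    simp [hin]
  -- A's calc value for this i
  have hsplit : List.range' (i+1) (H.length - i)
      = List.range' (i+1) (H.length - 1 - i) ++ [H.length] := by
    rw [(by omega : H.length - i = (H.length - 1 - i) + 1), List.range'_concat,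
        (by omega : i + 1 + 1 * (H.length - 1 - i) = H.length)]
  have hcalc : pvCalc i ((List.range H.length).reverse.foldl
      (fun t i => pvFillRow (pvPos H) H.length i t)
      ((List.range H.length).reverse.foldl
        (fun t i => fun a b => if a = i ∧ b = H.length then (1:Int) else t a b) (fun _ _ => 0)))
      H.length pvMOD
      = (((List.range' (i+1) (H.length - 1 - i)).map (pvR (pvPos H) H.length i (H.length - 1 - i))).sum
          + 1) % pvMOD := by
    simp only [pvCalc, htemp2, hsplit, List.foldl_append, List.foldl_cons, List.foldl_nil]
    rw [hA1 H.length (Or.inr le_rfl), if_pos rfl]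
    apply pv_add_emod_left
    rw [pv_fold_mod (pvR (pvPos H) H.length i (H.length - 1 - i)) pvMOD
        (List.range' (i+1) (H.length - 1 - i)) 0, zero_add]
  rw [hcalc, hA2 ((r + 1) % pvMOD) (pv_self (r+1) pvMOD)]
  show (r + (_ + 1) % pvMOD) % pvMOD = ((r + 1) % pvMOD + _) % pvMOD
  rw [pv_emod_add r ((((List.range' (i+1) (H.length - 1 - i)).map
        (pvR (pvPos H) H.length i (H.length - 1 - i))).sum + 1) % pvMOD) r
        (((List.range' (i+1) (H.length - 1 - i)).map
        (pvR (pvPos H) H.length i (H.length - 1 - i))).sum + 1) pvMOD rfl (pv_self _ pvMOD),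
      pv_emod_add ((r + 1) % pvMOD) _ (r + 1)
        (((List.range' (i+1) (H.length - 1 - i)).map
        (pvR (pvPos H) H.length i (H.length - 1 - i))).sum) pvMOD (pv_self _ pvMOD) rfl]
  congr 1
  ring
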